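-- pv_equiv track=rewrite | github.com/windangle/xiaoyaoyu_test | RamdomNumSort/贪婪算法.py | greedy_c
-- ===== SOURCE A (Python) =====
-- def greedy_c(dicTemp,discovered):
--     covered = {}
--     max_thing = list(dicTemp.keys())[0]
--     for item in dicTemp.keys():
--         discovered_count = 0
--         for item_b in dicTemp[item]:
--             if item_b in discovered:
--                 discovered_count += 1
--         covered[item] = discovered_count
--     for item in covered.keys():
--         if covered[item] > covered[max_thing]:
--             max_thing = item
--     for item in dicTemp[max_thing]:
--         if item in discovered:
--             discovered.remove(item)
--     dicTemp.pop(max_thing)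
--     return max_thing
-- ===== SOURCE B (Python) =====
-- def greedy_c(dicTemp, discovered):
--     # Inverted counting: instead of testing each dict item for membership in
--     # discovered, iterate the DISTINCT discovered elements and credit each key
--     # with that element's occurrence count in its list; then take the first
--     # key with maximal credit.
--     counts = dict.fromkeys(dicTemp, 0)
--     for e in set(discovered):
--         for key, items in dicTemp.items():
--             counts[key] += items.count(e)
--     best = max(dicTemp, key=counts.get)
--     for item in dicTemp.pop(best):
--         if item in discovered:
--             discovered.remove(item)
--     return best
-- ===== Notes on version B (the rewrite author's own statement) =====
-- stated objective: alternative
-- what changed: Inverts the counting loops: instead of A's per-key pass testing every list item for membership in discovered and storing counts in a covered dict scanned by a second argmax pass, B iterates the DISTINCT discovered elements (set(discovered)) and credits each key with that element's occurrence count via list.count, then takes the first maximal key with max(key=counts.get).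
import Mathlib
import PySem

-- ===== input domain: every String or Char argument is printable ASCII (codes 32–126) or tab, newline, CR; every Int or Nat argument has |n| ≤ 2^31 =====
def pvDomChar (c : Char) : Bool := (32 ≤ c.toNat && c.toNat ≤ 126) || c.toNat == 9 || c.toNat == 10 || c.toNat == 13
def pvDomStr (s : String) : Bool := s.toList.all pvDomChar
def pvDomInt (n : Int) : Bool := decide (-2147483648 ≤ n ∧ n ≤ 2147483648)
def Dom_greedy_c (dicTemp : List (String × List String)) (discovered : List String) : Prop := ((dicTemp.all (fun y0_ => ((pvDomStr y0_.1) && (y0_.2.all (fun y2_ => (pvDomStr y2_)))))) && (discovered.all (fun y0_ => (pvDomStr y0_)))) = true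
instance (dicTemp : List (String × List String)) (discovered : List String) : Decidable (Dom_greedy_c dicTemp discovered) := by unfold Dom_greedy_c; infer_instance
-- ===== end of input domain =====

-- B inverts A's counting: it iterates the distinct discovered elements crediting each key with that
-- element's occurrence count, instead of testing every dict item for membership in discovered.
-- Both Pythons mutate dicTemp/discovered identically (remove covered elements, pop the chosen key);
-- only the RETURN value is modeled and proved here.

-- ===== PORT A =====
-- dicTemp[item]: Python dict lookup = first match (keys are unique under Pre_)
def pvLookupA (dicTemp : List (String × List String)) (k : String) : List String :=
  ((dicTemp.find? (fun kv => kv.1 == k)).map Prod.snd).getD []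

def greedy_c (dicTemp : List (String × List String)) (discovered : List String) : String :=
  let keys := dicTemp.map Prod.fst
  let covered : PySem.Dict String Int :=
    keys.foldl (fun cov item =>
      cov.insert item
        ((pvLookupA dicTemp item).foldl
          (fun discovered_count item_b =>
            if item_b ∈ discovered then discovered_count + 1 else discovered_count) 0))
      PySem.Dict.empty
  match PySem.List.pyGet? keys 0 with
  | none => ""   -- list(dicTemp.keys())[0] raises IndexError on empty dicTemp; excluded by Pre_
  | some k0 =>
      covered.keys.foldl
        (fun max_thing item =>
          if covered.getD item 0 > covered.getD max_thing 0 then item else max_thing) k0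

-- ===== PORT B =====
-- counts = dict.fromkeys(dicTemp, 0); then for e in set(discovered): counts[key] += items.count(e);
-- best = max(dicTemp, key=counts.get)  (every key is present in counts, so get = getD 0).
-- Iteration over set(discovered) is order-insensitive here: counts only accumulates sums and is
-- only looked up afterwards.
def greedy_c_alt (dicTemp : List (String × List String)) (discovered : List String) : String :=
  let counts0 : PySem.Dict String Int :=
    dicTemp.foldl (fun d kv => d.insert kv.1 0) PySem.Dict.empty
  let counts : PySem.Dict String Int :=
    (PySem.Set.ofList discovered).foldl
      (fun cnt e =>
        dicTemp.foldl
          (fun cnt kv => cnt.insert kv.1 (cnt.getD kv.1 0 + (PySem.List.count kv.2 e : Int)))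
          cnt)
      counts0
  match dicTemp.map Prod.fst with
  | [] => ""   -- max() on an empty dict raises ValueError; excluded by Pre_
  | k0 :: rest =>
      rest.foldl (fun best k => if counts.getD k 0 > counts.getD best 0 then k else best) k0

-- ===== PRECONDITION & SPEC =====
-- Pre_ excludes the empty dict, on which A raises IndexError (and B raises ValueError), and association
-- lists with duplicate keys, which cannot arise from a Python dict argument at all.
def Pre_greedy_c (dicTemp : List (String × List String)) (discovered : List String) : Prop :=
  dicTemp ≠ [] ∧ (dicTemp.map Prod.fst).Nodup
instance (dicTemp : List (String × List String)) (discovered : List String) : Decidable (Pre_greedy_c dicTemp discovered) := by unfold Pre_greedy_c; infer_instance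

def pvWitness_greedy_c : (List (String × List String)) × List String :=
  ([("a", ["x", "y"]), ("b", ["y"])], ["y", "z"])

def Spec_greedy_c (dicTemp : List (String × List String)) (discovered : List String) (out : String) : Prop := out = greedy_c_alt dicTemp discovered
instance (dicTemp : List (String × List String)) (discovered : List String) (out : String) : Decidable (Spec_greedy_c dicTemp discovered out) := by unfold Spec_greedy_c; infer_instance

-- ===== CLAIM (what is proved, stated in full; the proofs are below) =====
def Claim_equal_greedy_c : Prop := ∀ (dicTemp : List (String × List String)) (discovered : List String), Dom_greedy_c dicTemp discovered → Pre_greedy_c dicTemp discovered → Spec_greedy_c dicTemp discovered (greedy_c dicTemp discovered)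

-- ===== LEMMAS AND PROOFS =====

-- the per-key count A computes
def pvCnt (discovered : List String) (xs : List String) : Int :=
  xs.foldl (fun c x => if x ∈ discovered then c + 1 else c) 0

-- lookups in the dict built by A's counting loop
theorem pv_getD (v : String → Int) : ∀ (l : List String) (d : PySem.Dict String Int) (x : String),
    (l.foldl (fun cov item => cov.insert item (v item)) d).getD x 0
      = if x ∈ l then v x else d.getD x 0 := by
  intro l
  induction l with
  | nil => intro d x; simp
  | cons a t ih =>
    intro d x
    simp only [List.foldl_cons, ih, PySem.Dict.getD_insert, List.mem_cons]
    by_cases hxt : x ∈ t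
    · simp [hxt]
    · by_cases hxa : x = a <;> simp [hxt, hxa]

-- items of that dict: inserting fresh distinct keys appends in order
theorem pv_items (v : String → Int) : ∀ (l : List String) (d : PySem.Dict String Int),
    l.Nodup → (∀ x ∈ l, d.contains x = false) →
    (l.foldl (fun cov item => cov.insert item (v item)) d).items
      = d.items ++ l.map (fun k => (k, v k)) := by
  intro l
  induction l with
  | nil => intro d _ _; simp
  | cons a t ih =>
    intro d hnd hfresh
    simp only [List.nodup_cons] at hnd
    simp only [List.foldl_cons]
    rw [ih _ hnd.2 (by
      intro x hx
      rw [PySem.Dict.contains_insert]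
      have : (x == a) = false := by
        simp only [beq_eq_false_iff_ne]; intro he; exact hnd.1 (he ▸ hx)
      simp [this, hfresh x (List.mem_cons_of_mem _ hx)])]
    rw [PySem.Dict.items_insert_of_not_contains (h := hfresh a (List.mem_cons_self ..))]
    simp

-- B's init dict.fromkeys(dicTemp, 0): every lookup with default 0 reads 0
theorem pv_init0 : ∀ (l : List (String × List String)) (d : PySem.Dict String Int) (x : String),
    d.getD x 0 = 0 →
    (l.foldl (fun d kv => d.insert kv.1 (0 : Int)) d).getD x 0 = 0 := by
  intro l
  induction l with
  | nil => intro d x h; simpa using h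
  | cons a t ih =>
    intro d x h
    simp only [List.foldl_cons]
    exact ih _ x (by rw [PySem.Dict.getD_insert]; split <;> simp [h])

-- B's inner credit pass over a nodup dict adds count(items, e) to exactly the matching key
theorem pv_inner (e : String) :
    ∀ (l : List (String × List String)) (cnt : PySem.Dict String Int) (x : String),
    (l.map Prod.fst).Nodup →
    (l.foldl (fun cnt kv => cnt.insert kv.1 (cnt.getD kv.1 0 + (PySem.List.count kv.2 e : Int))) cnt).getD x 0
      = cnt.getD x 0 + (if x ∈ l.map Prod.fst then (PySem.List.count (pvLookupA l x) e : Int) else 0) := by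
  intro l
  induction l with
  | nil => intro cnt x _; simp
  | cons a t ih =>
    intro cnt x hnd
    simp only [List.map_cons, List.nodup_cons] at hnd
    simp only [List.foldl_cons]
    rw [ih _ x hnd.2]
    by_cases hxt : x ∈ t.map Prod.fst
    · have hne : x ≠ a.1 := fun he => hnd.1 (he ▸ hxt)
      have hb : (a.1 == x) = false := by simp [Ne.symm hne]
      rw [PySem.Dict.getD_insert, if_neg hne]
      simp [pvLookupA, List.find?, hb, hxt]
    · rw [PySem.Dict.getD_insert]
      by_cases hxa : x = a.1
      · subst hxa
        simp [pvLookupA, hxt]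
      · have hb : (a.1 == x) = false := by simp [Ne.symm hxa]
        simp [hxt, hxa]

-- B's outer loop over a list of elements: counts accumulate additively
theorem pv_outer (l : List (String × List String)) (hnd : (l.map Prod.fst).Nodup) :
    ∀ (S : List String) (cnt : PySem.Dict String Int) (x : String),
    (S.foldl (fun cnt e =>
        l.foldl (fun cnt kv => cnt.insert kv.1 (cnt.getD kv.1 0 + (PySem.List.count kv.2 e : Int))) cnt)
      cnt).getD x 0
      = cnt.getD x 0 +
        (if x ∈ l.map Prod.fst
         then (S.map (fun e => (PySem.List.count (pvLookupA l x) e : Int))).sum else 0) := by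
  intro S
  induction S with
  | nil => intro cnt x; simp
  | cons e S ih =>
    intro cnt x
    simp only [List.foldl_cons]
    rw [ih, pv_inner e l cnt x hnd]
    split <;> simp [List.sum_cons] <;> ring

-- summing per-element occurrence counts over the distinct discovered elements = A's membership count
theorem pv_sum_if (x : String) : ∀ (S : List String), S.Nodup →
    (S.map (fun e => if x == e then (1 : Int) else 0)).sum = if x ∈ S then 1 else 0 := by
  intro S
  induction S with
  | nil => simp
  | cons a t ih =>
    intro hnd
    simp only [List.nodup_cons] at hnd
    simp only [List.map_cons, List.sum_cons, ih hnd.2, List.mem_cons]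
    by_cases hxa : x = a
    · subst hxa
      simp [hnd.1]
    · simp [hxa, Ne.symm]

theorem pv_cnt_sum (discovered : List String) : ∀ (xs : List String),
    ((PySem.Set.ofList discovered).map (fun e => (PySem.List.count xs e : Int))).sum
      = pvCnt discovered xs := by
  intro xs
  induction xs with
  | nil => simp [pvCnt, PySem.List.count]
  | cons x t ih =>
    have hstep : ∀ e : String, (PySem.List.count (x :: t) e : Int)
        = (PySem.List.count t e : Int) + (if x == e then 1 else 0) := by
      intro e
      simp only [PySem.List.count_eq, List.count_cons]
      push_cast; ring
    have hmap : ((PySem.Set.ofList discovered).map (fun e => (PySem.List.count (x :: t) e : Int))).sum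
        = ((PySem.Set.ofList discovered).map (fun e => (PySem.List.count t e : Int))).sum
          + ((PySem.Set.ofList discovered).map (fun e => if x == e then (1 : Int) else 0)).sum := by
      rw [← List.sum_map_add]
      exact congrArg List.sum (List.map_congr_left (fun e _ => hstep e))
    rw [hmap, ih, pv_sum_if x _ (PySem.Set.nodup_ofList discovered)]
    have hmem : x ∈ PySem.Set.ofList discovered ↔ x ∈ discovered :=
      PySem.Set.mem_ofList discovered x
    have hpv : pvCnt discovered (x :: t)
        = (if x ∈ discovered then 1 else 0) + pvCnt discovered t := by
      simp only [pvCnt, List.foldl_cons]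
      rw [PySem.List.foldl_ite_add_one, PySem.List.foldl_ite_add_one]
      split <;> ring
    rw [hpv]
    by_cases hx : x ∈ discovered <;> simp [hx, hmem] <;> ring

-- two argmax folds with comparator functions agreeing on the traversed keys coincide
theorem pv_argmax_congr (h1 h2 : String → Int) : ∀ (l : List String) (m : String),
    (∀ x ∈ l, h1 x = h2 x) → h1 m = h2 m →
    l.foldl (fun m k => if h1 k > h1 m then k else m) m
      = l.foldl (fun m k => if h2 k > h2 m then k else m) m := by
  intro l
  induction l with
  | nil => intro m _ _; rfl
  | cons a t ih =>
    intro m hl hm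
    have ha : h1 a = h2 a := hl a (List.mem_cons_self ..)
    have ht : ∀ x ∈ t, h1 x = h2 x := fun x hx => hl x (List.mem_cons_of_mem _ hx)
    simp only [List.foldl_cons]
    by_cases hc : h1 a > h1 m
    · rw [if_pos hc, if_pos (by rw [← ha, ← hm]; exact hc), ih a ht ha]
    · rw [if_neg hc, if_neg (by rw [← ha, ← hm]; exact hc), ih m ht hm]

theorem main_eq (kv0 : String × List String) (rest : List (String × List String))
    (discovered : List String)
    (hnd : (((kv0 :: rest) : List (String × List String)).map Prod.fst).Nodup) :
    greedy_c (kv0 :: rest) discovered = greedy_c_alt (kv0 :: rest) discovered := by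
  classical
  set dicTemp : List (String × List String) := kv0 :: rest with hdt
  have keys_def : dicTemp.map Prod.fst = kv0.1 :: rest.map Prod.fst := by simp [hdt]
  let v : String → Int := fun k => pvCnt discovered (pvLookupA dicTemp k)
  let covered : PySem.Dict String Int :=
    (dicTemp.map Prod.fst).foldl (fun cov item => cov.insert item (v item)) PySem.Dict.empty
  let g : String → Int := fun k => covered.getD k 0
  -- A in terms of the abbreviations
  have hA : greedy_c dicTemp discovered
      = (rest.map Prod.fst).foldl (fun m item => if g item > g m then item else m) kv0.1 := by
    have hstep : greedy_c dicTemp discovered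
        = (match PySem.List.pyGet? (dicTemp.map Prod.fst) 0 with
          | none => ""
          | some k0 => covered.keys.foldl (fun m item => if g item > g m then item else m) k0) := rfl
    rw [hstep, keys_def]
    have hitems : covered.items = (dicTemp.map Prod.fst).map (fun k => (k, v k)) := by
      have := pv_items v (dicTemp.map Prod.fst) PySem.Dict.empty hnd
        (by intro x _; exact PySem.Dict.contains_empty x)
      simpa using this
    have hkeys : covered.keys = dicTemp.map Prod.fst := by
      simp only [PySem.Dict.keys, hitems, List.map_map]
      simp
    rw [hkeys, keys_def]
    simp [PySem.List.pyGet?, PySem.List.pyIdx?]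
  -- B in terms of its abbreviations
  let counts0 : PySem.Dict String Int :=
    dicTemp.foldl (fun d kv => d.insert kv.1 0) PySem.Dict.empty
  let counts : PySem.Dict String Int :=
    (PySem.Set.ofList discovered).foldl
      (fun cnt e =>
        dicTemp.foldl
          (fun cnt kv => cnt.insert kv.1 (cnt.getD kv.1 0 + (PySem.List.count kv.2 e : Int)))
          cnt)
      counts0
  let g' : String → Int := fun k => counts.getD k 0
  have hB : greedy_c_alt dicTemp discovered
      = (rest.map Prod.fst).foldl (fun m k => if g' k > g' m then k else m) kv0.1 := by
    have hstep : greedy_c_alt dicTemp discovered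
        = (match dicTemp.map Prod.fst with
          | [] => ""
          | k0 :: r => r.foldl (fun best k => if counts.getD k 0 > counts.getD best 0 then k else best) k0) := rfl
    rw [hstep, keys_def]
  -- both comparators compute v on keys
  have hgv : ∀ x ∈ dicTemp.map Prod.fst, g x = v x := by
    intro x hx
    show covered.getD x 0 = v x
    rw [pv_getD v (dicTemp.map Prod.fst) PySem.Dict.empty x, if_pos hx]
  have hg'v : ∀ x ∈ dicTemp.map Prod.fst, g' x = v x := by
    intro x hx
    show counts.getD x 0 = v x
    have h0 : counts0.getD x 0 = 0 :=
      pv_init0 dicTemp PySem.Dict.empty x (by simp)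
    show ((PySem.Set.ofList discovered).foldl _ counts0).getD x 0 = v x
    rw [pv_outer dicTemp hnd (PySem.Set.ofList discovered) counts0 x, h0, if_pos hx,
      pv_cnt_sum discovered (pvLookupA dicTemp x)]
    simp [v]
  have hgg' : ∀ x ∈ dicTemp.map Prod.fst, g x = g' x := by
    intro x hx; rw [hgv x hx, hg'v x hx]
  rw [hA, hB]
  exact pv_argmax_congr g g' (rest.map Prod.fst) kv0.1
    (fun x hx => hgg' x (by rw [keys_def]; exact List.mem_cons_of_mem _ hx))
    (hgg' kv0.1 (by rw [keys_def]; exact List.mem_cons_self ..))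

-- ===== VERDICT (by name: the statement is the Claim_ definition above) =====
theorem greedy_c_spec : Claim_equal_greedy_c := by
  intro dicTemp discovered _ hpre
  obtain ⟨hne, hnd⟩ := hpre
  obtain ⟨kv0, rest, rfl⟩ : ∃ kv0 rest, dicTemp = kv0 :: rest := by
    cases dicTemp with
    | nil => exact absurd rfl hne
    | cons a t => exact ⟨a, t, rfl⟩
  exact main_eq kv0 rest discovered hnd
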